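-- pv_equiv track=rewrite | github.com/pypi-data/pypi-mirror-310 | packages/ngcsdk/ngcsdk-3.41.2-py3-none-any.whl/ngcbpc/transfer/utils.py | _parent_exists
-- ===== SOURCE A (Python) =====
-- def _parent_exists(_target, _dir_list):
--     """
--     Determine if any parent dirs exist.
--
--     Given a target and directory list,
--     check if any dirs in the directory list
--     are a parent of the target.
--     """
--     _target_split = [_f for _f in _target.split("/") if _f]
--     for _dir in _dir_list:
--         _dir_split = [_f for _f in _dir.split("/") if _f]
--         _len = len(_dir_split)
--         # don't process the target
--         if _target_split == _dir_split:
--             continue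
--         # potential parents will have len >= target
--         if len(_target_split) < _len:
--             continue
--         if _dir_split == _target_split[:_len]:
--             return True
--     return False
-- ===== SOURCE B (Python) =====
-- def _parent_exists(_target, _dir_list):
--     """Check if any dir in _dir_list is a parent of _target."""
--     _target_split = [_f for _f in _target.split("/") if _f]
--     prefixes = {tuple(_target_split[:i]) for i in range(len(_target_split))}
--     return any(tuple([_f for _f in _d.split("/") if _f]) in prefixes
--                for _d in _dir_list)
-- ===== Notes on version B (the rewrite author's own statement) =====
-- stated objective: alternative
-- what changed: B precomputes the set of the target's proper prefixes once and reduces the scan to a single membership test per dir, removing A's per-dir equality/length/slice branch chain.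
import Mathlib
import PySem

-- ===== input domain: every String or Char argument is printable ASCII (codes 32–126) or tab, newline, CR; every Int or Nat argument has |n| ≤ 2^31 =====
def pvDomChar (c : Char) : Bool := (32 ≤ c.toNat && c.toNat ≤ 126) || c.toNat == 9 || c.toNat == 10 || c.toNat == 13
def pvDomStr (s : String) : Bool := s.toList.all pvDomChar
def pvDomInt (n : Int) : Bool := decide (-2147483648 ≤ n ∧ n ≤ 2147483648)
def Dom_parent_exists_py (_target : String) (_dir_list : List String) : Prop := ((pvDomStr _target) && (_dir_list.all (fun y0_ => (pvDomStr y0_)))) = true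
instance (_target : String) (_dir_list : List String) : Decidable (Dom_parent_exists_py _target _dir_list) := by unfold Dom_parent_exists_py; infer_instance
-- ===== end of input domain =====

-- B replaces A's per-dir equality/length/slice branch chain by one precomputed set of the
-- target's proper prefixes and a single membership test per dir (objective: alternative).

-- shared trivial helper: [_f for _f in s.split("/") if _f]
def pySplitSlash (s : String) : List String :=
  -- s.split("/") then drop empty pieces; split? is some since the separator "/" is nonempty
  ((PySem.Str.split? s "/").getD []).filter (fun f => f ≠ "")

-- ===== PORT A =====
def pvLoopA (ts : List String) : List String → Bool
  | [] => false
  | d :: rest =>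
    let ds := pySplitSlash d
    let len := ds.length
    if ts = ds then pvLoopA ts rest
    else if ts.length < len then pvLoopA ts rest
    else if ds = ts.take len then true
    else pvLoopA ts rest

def parent_exists_py (_target : String) (_dir_list : List String) : Bool :=
  pvLoopA (pySplitSlash _target) _dir_list

-- ===== PORT B =====
def parent_exists_py_alt (_target : String) (_dir_list : List String) : Bool :=
  let ts := pySplitSlash _target
  let prefixes : PySem.Set (List String) :=
    PySem.Set.ofList ((List.range ts.length).map (fun i => ts.take i))
  _dir_list.any (fun d => PySem.Set.contains prefixes (pySplitSlash d))

-- ===== PRECONDITION & SPEC =====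
def Spec_parent_exists_py (_target : String) (_dir_list : List String) (out : Bool) : Prop := out = parent_exists_py_alt _target _dir_list
instance (_target : String) (_dir_list : List String) (out : Bool) : Decidable (Spec_parent_exists_py _target _dir_list out) := by unfold Spec_parent_exists_py; infer_instance

-- ===== CLAIM (what is proved, stated in full; the proofs are below) =====
def Claim_equal_parent_exists_py : Prop := ∀ (_target : String) (_dir_list : List String), Dom_parent_exists_py _target _dir_list → Spec_parent_exists_py _target _dir_list (parent_exists_py _target _dir_list)

-- ===== LEMMAS AND PROOFS =====

-- A's branch chain accepts ds exactly when ds is a proper prefix of ts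
lemma hit_iff (ts ds : List String) :
    ((¬ ts = ds) ∧ ¬ ts.length < ds.length ∧ ds = ts.take ds.length) ↔
      ds ∈ (List.range ts.length).map (fun i => ts.take i) := by
  constructor
  · rintro ⟨hne, hlen, heq⟩
    have hle : ds.length ≤ ts.length := Nat.le_of_not_lt hlen
    have hlt : ds.length < ts.length := by
      rcases Nat.lt_or_ge ds.length ts.length with h | h
      · exact h
      · exfalso
        have : ds.length = ts.length := Nat.le_antisymm hle h
        apply hne
        rw [heq, this, List.take_length]
    exact List.mem_map.mpr ⟨ds.length, List.mem_range.mpr hlt, heq.symm⟩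
  · intro h
    rcases List.mem_map.mp h with ⟨i, hi, hds⟩
    have hi' : i < ts.length := List.mem_range.mp hi
    have hlen : ds.length = i := by
      rw [← hds, List.length_take]; omega
    refine ⟨?_, by omega, by rw [hlen, hds]⟩
    intro hts
    have : ts.length = i := by rw [hts, hlen]
    omega

lemma contains_prefixes (ts ds : List String) :
    PySem.Set.contains
        (PySem.Set.ofList ((List.range ts.length).map (fun i => ts.take i))) ds
      = decide (ds ∈ (List.range ts.length).map (fun i => ts.take i)) := by
  by_cases h : ds ∈ (List.range ts.length).map (fun i => ts.take i)
  · have hm : ds ∈ PySem.Set.ofList ((List.range ts.length).map (fun i => ts.take i)) :=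
      (PySem.Set.mem_ofList _ _).mpr h
    simp [hm, h]
  · have hm : ds ∉ PySem.Set.ofList ((List.range ts.length).map (fun i => ts.take i)) :=
      fun hc => h ((PySem.Set.mem_ofList _ _).mp hc)
    simp [hm, h]

lemma loop_eq_any (ts : List String) (l : List String) :
    pvLoopA ts l =
      l.any (fun d => PySem.Set.contains
        (PySem.Set.ofList ((List.range ts.length).map (fun i => ts.take i)))
        (pySplitSlash d)) := by
  induction l with
  | nil => rfl
  | cons d rest ih =>
    simp only [contains_prefixes] at ih ⊢
    simp only [pvLoopA, List.any_cons]
    by_cases h1 : ts = pySplitSlash d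
    · rw [if_pos h1, ih, decide_eq_false (fun h => ((hit_iff ts _).mpr h).1 h1),
        Bool.false_or]
    · rw [if_neg h1]
      by_cases h2 : ts.length < (pySplitSlash d).length
      · rw [if_pos h2, ih, decide_eq_false (fun h => ((hit_iff ts _).mpr h).2.1 h2),
          Bool.false_or]
      · rw [if_neg h2]
        by_cases h3 : pySplitSlash d = ts.take (pySplitSlash d).length
        · rw [if_pos h3, decide_eq_true ((hit_iff ts _).mp ⟨h1, h2, h3⟩), Bool.true_or]
        · rw [if_neg h3, ih, decide_eq_false (fun h => h3 (((hit_iff ts _).mpr h).2.2)),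
            Bool.false_or]

-- ===== VERDICT (by name: the statement is the Claim_ definition above) =====
theorem parent_exists_py_spec : Claim_equal_parent_exists_py := by
  intro _target _dir_list _hdom
  unfold Spec_parent_exists_py parent_exists_py parent_exists_py_alt
  exact loop_eq_any _ _
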